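-- pv_equiv track=rewrite | github.com/StevenXoFk/Tarea-taller-Tkinter | convertidor.py | base10_a_base15
-- ===== SOURCE A (Python) =====
-- def base10_a_base15(numero):
--     res = 0
--     exponentee = 0
--     base15 = ""
--
--
--     diles = "0123456789ABCDEF"
--
--     while numero > 0:
--         nuevo = numero % 10
--         res += nuevo * (10 ** exponentee)
--         numero //= 10
--         exponentee += 1
--
--     while res > 0:
--         todo = res % 15
--         base15 = diles[todo] + base15
--         res //= 15
--
--     return base15
-- ===== SOURCE B (Python) =====
-- def base10_a_base15(numero):
--     diles = "0123456789ABCDEF"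
--     if numero <= 0:
--         return ""
--     return base10_a_base15(numero // 15) + diles[numero % 15]
-- ===== Notes on version B (the rewrite author's own statement) =====
-- stated objective: simpler
-- what changed: Drops A's redundant first loop (which only reconstructs the input digit by digit) and replaces the iterative prepend loop with a direct recursion on successive base-15 quotients, building the string MSB-first from the outer calls.
import Mathlib
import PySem

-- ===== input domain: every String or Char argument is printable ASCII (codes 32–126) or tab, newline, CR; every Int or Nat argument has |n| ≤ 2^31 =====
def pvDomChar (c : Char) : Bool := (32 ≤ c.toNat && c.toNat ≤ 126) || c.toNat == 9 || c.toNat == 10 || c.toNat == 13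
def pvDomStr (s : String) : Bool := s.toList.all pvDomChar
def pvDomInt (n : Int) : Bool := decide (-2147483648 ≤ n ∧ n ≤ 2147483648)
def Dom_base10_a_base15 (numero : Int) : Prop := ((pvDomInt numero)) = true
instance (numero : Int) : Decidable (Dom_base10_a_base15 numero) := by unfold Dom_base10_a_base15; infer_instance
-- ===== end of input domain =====

-- B drops A's redundant first loop (it only reconstructs the input) and converts to base 15
-- by direct recursion on the quotient instead of an iterative prepend loop; equivalence is total.

-- digit table "0123456789ABCDEF" as a list of characters (strings are proved on the list side)
def pvDiles : List Char :=
  ['0','1','2','3','4','5','6','7','8','9','A','B','C','D','E','F']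

-- ===== PORT A =====
-- first while loop of A: rebuilds `res` from the decimal digits of `numero`
def pvLoopA1 (numero res : Int) (exponentee : Nat) : Int :=
  if _h : numero > 0 then
    pvLoopA1 (PySem.Int.floordiv numero 10)
             (res + PySem.Int.mod numero 10 * 10 ^ exponentee) (exponentee + 1)
  else res
termination_by numero.toNat
decreasing_by
  rw [PySem.Int.floordiv_eq_ediv_of_pos (by omega)]
  omega

-- second while loop of A: prepends base-15 digits (diles[todo] + base15 = cons on the char list)
def pvLoopA2 (res : Int) (base15 : List Char) : List Char :=
  if _h : res > 0 then
    pvLoopA2 (PySem.Int.floordiv res 15)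
             (PySem.List.pyGetD pvDiles (PySem.Int.mod res 15) '0' :: base15)
  else base15
termination_by res.toNat
decreasing_by
  rw [PySem.Int.floordiv_eq_ediv_of_pos (by omega)]
  omega

def base10_a_base15 (numero : Int) : String :=
  String.ofList (pvLoopA2 (pvLoopA1 numero 0 0) [])

-- ===== PORT B =====
-- recursion of Source B on the char-list side
def pvAltChars (numero : Int) : List Char :=
  if _h : numero ≤ 0 then []
  else pvAltChars (PySem.Int.floordiv numero 15) ++
       [PySem.List.pyGetD pvDiles (PySem.Int.mod numero 15) '0']
termination_by numero.toNat
decreasing_by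
  rw [PySem.Int.floordiv_eq_ediv_of_pos (by omega)]
  omega

def base10_a_base15_alt (numero : Int) : String :=
  String.ofList (pvAltChars numero)

-- ===== PRECONDITION & SPEC =====
def Spec_base10_a_base15 (numero : Int) (out : String) : Prop := out = base10_a_base15_alt numero
instance (numero : Int) (out : String) : Decidable (Spec_base10_a_base15 numero out) := by unfold Spec_base10_a_base15; infer_instance

-- ===== CLAIM (what is proved, stated in full; the proofs are below) =====
def Claim_equal_base10_a_base15 : Prop := ∀ (numero : Int), Dom_base10_a_base15 numero → Spec_base10_a_base15 numero (base10_a_base15 numero)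

-- ===== LEMMAS AND PROOFS =====

-- A's first loop is the identity on nonnegative input: it returns res + numero * 10^exponentee.
theorem pvLoopA1_eq (numero res : Int) (e : Nat) (hn : 0 ≤ numero) :
    pvLoopA1 numero res e = res + numero * 10 ^ e := by
  induction numero, res, e using pvLoopA1.induct with
  | case1 n r e h ih =>
    rw [pvLoopA1, dif_pos h]
    rw [ih (by rw [PySem.Int.floordiv_eq_ediv_of_pos (by omega)]; omega)]
    have hkey : PySem.Int.mod n 10 + PySem.Int.floordiv n 10 * 10 = n := by
      rw [PySem.Int.mod_eq_emod_of_pos (by omega),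
          PySem.Int.floordiv_eq_ediv_of_pos (by omega)]
      omega
    calc r + PySem.Int.mod n 10 * 10 ^ e + PySem.Int.floordiv n 10 * 10 ^ (e + 1)
        = r + (PySem.Int.mod n 10 + PySem.Int.floordiv n 10 * 10) * 10 ^ e := by ring
      _ = r + n * 10 ^ e := by rw [hkey]
  | case2 n r e h =>
    rw [pvLoopA1, dif_neg h]
    have : n = 0 := by omega
    simp [this]

-- A's second loop equals B's recursion followed by the accumulator.
theorem pvLoopA2_eq (res : Int) (acc : List Char) :
    pvLoopA2 res acc = pvAltChars res ++ acc := by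
  induction res, acc using pvLoopA2.induct with
  | case1 r acc h ih =>
    have hr : pvAltChars r = pvAltChars (PySem.Int.floordiv r 15) ++
        [PySem.List.pyGetD pvDiles (PySem.Int.mod r 15) '0'] := by
      rw [pvAltChars, dif_neg (by omega)]
    rw [pvLoopA2, dif_pos h, ih, hr]
    simp
  | case2 r acc h =>
    rw [pvLoopA2, dif_neg h, pvAltChars, dif_pos (by omega)]
    simp

-- ===== VERDICT (by name: the statement is the Claim_ definition above) =====
theorem base10_a_base15_spec : Claim_equal_base10_a_base15 := by
  intro numero _
  unfold Spec_base10_a_base15 base10_a_base15 base10_a_base15_alt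
  by_cases h : numero ≤ 0
  · have h1 : pvLoopA1 numero 0 0 = 0 := by rw [pvLoopA1, dif_neg (by omega)]
    rw [h1, pvLoopA2_eq, pvAltChars, dif_pos (by omega), pvAltChars, dif_pos h]
    simp
  · have h1 : pvLoopA1 numero 0 0 = numero := by
      rw [pvLoopA1_eq numero 0 0 (by omega)]; ring
    rw [h1, pvLoopA2_eq]
    simp
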